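-- pv_equiv track=rewrite | github.com/KotlecikzZiemniaczkami/compression | decompress.py | binary_genre
-- ===== SOURCE A (Python) =====
-- import math
--
-- def binary_genre(signes: list):
--     bits = math.ceil(math.log2(len(signes)))
--     assignment = {}
--     for i in range(len(signes)):
--         new_bin = bin(i)[2:]
--         while len(new_bin) < bits:
--             new_bin = '0' + new_bin
--         assignment[new_bin] = signes[i]
--     return assignment
-- ===== SOURCE B (Python) =====
-- import math
-- from itertools import product
--
--
-- def binary_genre(signes: list):
--     # at least one bit wide, so the single-symbol code is '0' not ''
--     bits = max(math.ceil(math.log2(len(signes))), 1)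
--     return {''.join(digits): sym for digits, sym in zip(product('01', repeat=bits), signes)}
-- ===== Notes on version B (the rewrite author's own statement) =====
-- stated objective: idiomatic
-- what changed: Instead of converting each index with bin() and left-padding in a while-loop, B enumerates all width-bits binary strings directly via itertools.product('01', repeat=bits) in counting order and zips them with the symbols; Pre_ excludes only the empty list, on which both raise ValueError from math.log2(0).
import Mathlib
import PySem

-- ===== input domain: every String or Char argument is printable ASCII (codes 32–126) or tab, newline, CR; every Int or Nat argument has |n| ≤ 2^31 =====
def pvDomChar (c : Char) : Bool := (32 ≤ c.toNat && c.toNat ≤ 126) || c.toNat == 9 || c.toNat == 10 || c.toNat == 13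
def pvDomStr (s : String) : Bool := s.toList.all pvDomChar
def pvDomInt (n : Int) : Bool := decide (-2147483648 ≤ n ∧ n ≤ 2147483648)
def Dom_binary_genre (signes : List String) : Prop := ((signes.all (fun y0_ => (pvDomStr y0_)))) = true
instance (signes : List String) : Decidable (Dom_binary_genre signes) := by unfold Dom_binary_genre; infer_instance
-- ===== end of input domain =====

-- B replaces A's per-index bin()+pad-loop by direct enumeration of all fixed-width
-- binary strings (itertools.product) zipped with the symbols: same cost, more idiomatic.


-- ===== PORT A =====
-- bin(i)[2:] for i ≥ 1 (returns [] at 0; pvBin below handles bin(0)[2:] = "0")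
def pvBinCore (i : Nat) : List Char :=
  if h : i = 0 then []
  else pvBinCore (i / 2) ++ [if i % 2 = 1 then '1' else '0']
termination_by i
decreasing_by exact Nat.div_lt_self (Nat.pos_of_ne_zero h) (by norm_num)

def pvBin (i : Nat) : List Char := if i = 0 then ['0'] else pvBinCore i

-- the `while len(new_bin) < bits: new_bin = '0' + new_bin` loop
def pvPad (l : List Char) (bits : Nat) : List Char :=
  if l.length < bits then pvPad ('0' :: l) bits else l
termination_by bits - l.length

-- math.ceil(math.log2 n) is exactly Nat.clog 2 n for n ≥ 1; n = 0 raises (excluded by Pre_)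
def binary_genre (signes : List String) : List (String × String) :=
  let bits := Nat.clog 2 signes.length
  ((List.range signes.length).foldl
      (fun d i => d.insert (String.ofList (pvPad (pvBin i) bits)) (signes.getD i ""))
      PySem.Dict.empty).items

-- ===== PORT B =====
-- itertools.product('01', repeat=w), each tuple as a list of chars, in iteration order
def pvProd01 : Nat → List (List Char)
  | 0 => [[]]
  | w + 1 => (pvProd01 w).map (fun l => '0' :: l) ++ (pvProd01 w).map (fun l => '1' :: l)

def binary_genre_alt (signes : List String) : List (String × String) :=
  let bits := max (Nat.clog 2 signes.length) 1
  List.zip ((pvProd01 bits).map (fun l => String.ofList l)) signes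

-- ===== PRECONDITION & SPEC =====
-- Pre_ excludes only the empty list, on which A raises ValueError (math.log2(0.0)).
def Pre_binary_genre (signes : List String) : Prop := signes ≠ []
instance (signes : List String) : Decidable (Pre_binary_genre signes) := by
  unfold Pre_binary_genre; infer_instance
def pvWitness_binary_genre : List String := ["a", "b", "c"]

def Spec_binary_genre (signes : List String) (out : List (String × String)) : Prop := out = binary_genre_alt signes
instance (signes : List String) (out : List (String × String)) : Decidable (Spec_binary_genre signes out) := by unfold Spec_binary_genre; infer_instance

-- ===== CLAIM (what is proved, stated in full; the proofs are below) =====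
def Claim_equal_binary_genre : Prop := ∀ (signes : List String), Dom_binary_genre signes → Pre_binary_genre signes → Spec_binary_genre signes (binary_genre signes)

-- ===== LEMMAS AND PROOFS =====

-- fixed-width (w) binary representation of i, MSB first (meaningful for i < 2^w)
def fwL : Nat → Nat → List Char
  | 0, _ => []
  | w + 1, i => fwL w (i / 2) ++ [if i % 2 = 1 then '1' else '0']

theorem fwL_length (w i : Nat) : (fwL w i).length = w := by
  induction w generalizing i with
  | zero => rfl
  | succ w ih => simp [fwL, ih]

theorem fwL_lt {w i : Nat} (h : i < 2 ^ w) : fwL (w + 1) i = '0' :: fwL w i := by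
  induction w generalizing i with
  | zero => interval_cases i <;> rfl
  | succ w ih =>
      have hp : (2 : Nat) ^ (w + 1) = 2 * 2 ^ w := by ring
      have h2 : i / 2 < 2 ^ w := by omega
      show fwL (w + 1) (i / 2) ++ _ = '0' :: (fwL w (i / 2) ++ _)
      rw [ih h2]; rfl

theorem fwL_ge {w i : Nat} (h : i < 2 ^ w) :
    fwL (w + 1) (2 ^ w + i) = '1' :: fwL w i := by
  induction w generalizing i with
  | zero => interval_cases i <;> rfl
  | succ w ih =>
      have hp : (2 : Nat) ^ (w + 1) = 2 * 2 ^ w := by ring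
      have hdiv : (2 ^ (w + 1) + i) / 2 = 2 ^ w + i / 2 := by omega
      have hmod : (2 ^ (w + 1) + i) % 2 = i % 2 := by omega
      have h2 : i / 2 < 2 ^ w := by omega
      show fwL (w + 1) ((2 ^ (w + 1) + i) / 2) ++ [if (2 ^ (w + 1) + i) % 2 = 1 then '1' else '0']
          = '1' :: (fwL w (i / 2) ++ [if i % 2 = 1 then '1' else '0'])
      rw [hdiv, hmod, ih h2]; rfl

theorem prod01_eq (w : Nat) : pvProd01 w = (List.range (2 ^ w)).map (fwL w) := by
  induction w with
  | zero => rfl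
  | succ w ih =>
      rw [pvProd01, ih, show (2 : Nat) ^ (w + 1) = 2 ^ w + 2 ^ w by ring,
        List.range_add, List.map_append, List.map_map, List.map_map]
      rw [List.map_map]
      congr 1
      · exact List.map_congr_left fun i hi => (fwL_lt (List.mem_range.mp hi)).symm
      · exact List.map_congr_left fun i hi => (fwL_ge (List.mem_range.mp hi)).symm

theorem binCore_eq {w i : Nat} (h1 : 2 ^ w ≤ i) (h2 : i < 2 ^ (w + 1)) :
    pvBinCore i = fwL (w + 1) i := by
  induction w generalizing i with
  | zero =>
      have : i = 1 := by omega
      subst this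
      rw [pvBinCore]; simp [pvBinCore, fwL]
  | succ w ih =>
      have hp : (2 : Nat) ^ (w + 1) = 2 * 2 ^ w := by ring
      have hp2 : (2 : Nat) ^ (w + 2) = 2 * 2 ^ (w + 1) := by ring
      have hi0 : i ≠ 0 := by omega
      have hb1 : 2 ^ w ≤ i / 2 := by omega
      have hb2 : i / 2 < 2 ^ (w + 1) := by omega
      rw [pvBinCore]; rw [dif_neg hi0, ih hb1 hb2]; rfl

theorem pad_eq (l : List Char) (w : Nat) :
    pvPad l w = List.replicate (w - l.length) '0' ++ l := by
  fun_induction pvPad l w with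
  | case1 l h ih =>
      rw [ih, show ('0' :: l) = ['0'] ++ l from rfl, ← List.append_assoc,
        ← List.replicate_succ']
      congr 2
      simp at h ⊢
      omega
  | case2 l h =>
      have : w - l.length = 0 := by simp at h; omega
      simp [this]

theorem pad_succ {l : List Char} {w : Nat} (h : l.length ≤ w) :
    pvPad l (w + 1) = '0' :: pvPad l w := by
  rw [pad_eq, pad_eq, show w + 1 - l.length = (w - l.length) + 1 by omega,
    List.replicate_succ]
  rfl

theorem pad_bin {w i : Nat} (h : i < 2 ^ (w + 1)) :
    pvPad (pvBin i) (w + 1) = fwL (w + 1) i := by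
  induction w generalizing i with
  | zero =>
      interval_cases i
      · rw [pvBin, if_pos rfl, pad_eq]; rfl
      · rw [pvBin, if_neg one_ne_zero, pvBinCore]
        simp [pvBinCore, pad_eq, fwL]
  | succ w ih =>
      by_cases hlt : i < 2 ^ (w + 1)
      · have hpad := ih hlt
        have hlen : (pvBin i).length ≤ w + 1 := by
          have h1 := congrArg List.length hpad
          rw [fwL_length, pad_eq] at h1
          simp at h1
          omega
        rw [pad_succ hlen, hpad, fwL_lt hlt]
      · rw [Nat.not_lt] at hlt
        have hcore : pvBinCore i = fwL (w + 2) i := binCore_eq hlt h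
        have hi0 : i ≠ 0 := by
          have : (0 : Nat) < 2 ^ (w + 1) := Nat.two_pow_pos _
          omega
        rw [pvBin, if_neg hi0, hcore, pad_eq, fwL_length]
        simp

theorem key_eq {n i : Nat} (hi : i < n) :
    pvPad (pvBin i) (Nat.clog 2 n) = fwL (max (Nat.clog 2 n) 1) i := by
  rcases hb : Nat.clog 2 n with _ | w
  · have hn1 : n ≤ 1 := by
      by_contra hc
      have := Nat.clog_pos (by norm_num : 1 < 2) (by omega : 1 < n)
      omega
    have : i = 0 := by omega
    subst this
    rw [pvBin, if_pos rfl, pad_eq]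
    rfl
  · rw [show max (w + 1) 1 = w + 1 by omega]
    have hle : n ≤ 2 ^ (w + 1) := by
      rw [← hb]; exact Nat.le_pow_clog (by norm_num) n
    exact pad_bin (by omega)

theorem prod01_nodup (w : Nat) : (pvProd01 w).Nodup := by
  induction w with
  | zero => simp [pvProd01]
  | succ w ih =>
      rw [pvProd01]
      refine List.Nodup.append (ih.map ?_) (ih.map ?_) ?_
      · intro a b hab; simpa using hab
      · intro a b hab; simpa using hab
      · intro a ha hb
        simp only [List.mem_map] at ha hb
        obtain ⟨x, _, hx⟩ := ha
        obtain ⟨y, _, hy⟩ := hb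
        rw [← hx] at hy
        simp at hy

theorem pow_max_bound (n : Nat) : n ≤ 2 ^ max (Nat.clog 2 n) 1 := by
  by_cases h : n ≤ 1
  · calc n ≤ 1 := h
      _ ≤ 2 ^ max (Nat.clog 2 n) 1 := Nat.one_le_two_pow
  · calc n ≤ 2 ^ Nat.clog 2 n := Nat.le_pow_clog (by norm_num) n
      _ ≤ 2 ^ max (Nat.clog 2 n) 1 := Nat.pow_le_pow_right (by norm_num) (le_max_left _ _)

-- ===== VERDICT (by name: the statement is the Claim_ definition above) =====
theorem binary_genre_spec : Claim_equal_binary_genre := by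
  intro signes _ hne
  unfold Spec_binary_genre binary_genre binary_genre_alt
  set n := signes.length with hn
  set bits := Nat.clog 2 n with hbits
  set W := max bits 1 with hW
  have hnW : n ≤ 2 ^ W := pow_max_bound n
  have hkeys : (List.map (fun i => String.ofList (pvPad (pvBin i) bits)) (List.range n))
      = List.map (fun i => String.ofList (fwL W i)) (List.range n) :=
    List.map_congr_left fun i hi => by rw [key_eq (List.mem_range.mp hi)]
  have hinj : Function.Injective String.ofList := fun a b hab => by
    have := congrArg String.toList hab
    simpa using this
  have hnodup : (List.map (fun i => String.ofList (pvPad (pvBin i) bits)) (List.range n)).Nodup := by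
    rw [hkeys]
    refine List.Nodup.sublist (List.Sublist.map _ (List.range_sublist.mpr hnW)) ?_
    have : (List.range (2 ^ W)).map (fun i => String.ofList (fwL W i))
        = (pvProd01 W).map (fun l => String.ofList l) := by
      rw [prod01_eq, List.map_map]; rfl
    rw [this]
    exact (prod01_nodup W).map hinj
  rw [PySem.Dict.items_foldl_insert_fresh (List.range n)
      (fun i => String.ofList (pvPad (pvBin i) bits)) (fun i => signes.getD i "")
      PySem.Dict.empty (by intro a _; exact PySem.Dict.contains_empty _) hnodup]
  have hzip : (pvProd01 W).map (fun l => String.ofList l)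
      = (List.range (2 ^ W)).map (fun i => String.ofList (fwL W i)) := by
    rw [prod01_eq, List.map_map]; rfl
  simp only [hzip]
  have hemp : (PySem.Dict.empty : PySem.Dict String String).items = [] := rfl
  rw [hemp, List.nil_append]
  apply List.ext_getElem
  · simp [List.length_zip]
    omega
  · intro i h1 h2
    have hi : i < n := by simpa using h1
    rw [List.getElem_zip]
    simp only [List.getElem_map, List.getElem_range]
    have hk : pvPad (pvBin i) bits = fwL W i := key_eq hi
    rw [hk, List.getD_eq_getElem signes "" hi]
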